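-- pv_equiv track=rewrite | github.com/Guten-Morgen1302/yoga-mitra-poses-image | create_json_dataset.py | generate_corrections
-- ===== SOURCE A (Python) =====
-- def generate_corrections(pose_name, angles):
--     """Generate correction suggestions"""
--     corrections = {}
--     pose_lower = pose_name.lower()
--
--     if any(x in pose_lower for x in ["warrior", "standing"]):
--         corrections["stance"] = "Keep your feet grounded and weight evenly distributed"
--         corrections["alignment"] = "Align your front knee over your ankle"
--         corrections["spine"] = "Keep your spine neutral and shoulders relaxed"
--     elif any(x in pose_lower for x in ["forward", "fold"]):
--         corrections["spine"] = "Keep your back straight, hinge from the hips"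
--         corrections["hamstrings"] = "Don't force the stretch, bend your knees if needed"
--         corrections["neck"] = "Keep your neck relaxed"
--     elif any(x in pose_lower for x in ["handstand", "headstand", "shoulder"]):
--         corrections["alignment"] = "Keep your body in a straight line"
--         corrections["weight"] = "Distribute weight evenly through your support"
--         corrections["core"] = "Engage your core muscles for stability"
--     elif any(x in pose_lower for x in ["backbend", "wheel", "bow", "cobra"]):
--         corrections["spine"] = "Lengthen your spine, don't compress lower back"
--         corrections["shoulder"] = "Roll shoulders back and down"
--         corrections["breathing"] = "Breathe deeply, don't hold your breath"
--     elif any(x in pose_lower for x in ["twist", "revolved"]):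
--         corrections["spine"] = "Lengthen your spine before twisting"
--         corrections["shoulders"] = "Keep shoulders level and relaxed"
--         corrections["breathing"] = "Twist gently with each exhale"
--     elif any(x in pose_lower for x in ["hip", "pigeon", "frog"]):
--         corrections["hips"] = "Don't force the hip opening"
--         corrections["alignment"] = "Keep your hips level"
--         corrections["spine"] = "Keep your spine upright"
--     elif any(x in pose_lower for x in ["balance", "tree", "half moon"]):
--         corrections["focus"] = "Find a focal point to maintain balance"
--         corrections["core"] = "Engage your core for stability"
--         corrections["breathing"] = "Maintain steady, deep breathing"
--     else:
--         corrections["alignment"] = "Maintain proper spinal alignment"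
--         corrections["breathing"] = "Breathe deeply and steadily"
--         corrections["comfort"] = "Only go as deep as is comfortable"
--
--     return corrections
-- ===== SOURCE B (Python) =====
-- # Each keyword maps to the index of its correction category; the matched
-- # category is the MINIMUM index among all matching keywords (categories are
-- # numbered in the priority order of the original branches), default index 7.
-- _KEYWORD_CATEGORY = {
--     "warrior": 0, "standing": 0,
--     "forward": 1, "fold": 1,
--     "handstand": 2, "headstand": 2, "shoulder": 2,
--     "backbend": 3, "wheel": 3, "bow": 3, "cobra": 3,
--     "twist": 4, "revolved": 4,
--     "hip": 5, "pigeon": 5, "frog": 5,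
--     "balance": 6, "tree": 6, "half moon": 6,
-- }
--
-- _CATEGORY_CORRECTIONS = [
--     {"stance": "Keep your feet grounded and weight evenly distributed",
--      "alignment": "Align your front knee over your ankle",
--      "spine": "Keep your spine neutral and shoulders relaxed"},
--     {"spine": "Keep your back straight, hinge from the hips",
--      "hamstrings": "Don't force the stretch, bend your knees if needed",
--      "neck": "Keep your neck relaxed"},
--     {"alignment": "Keep your body in a straight line",
--      "weight": "Distribute weight evenly through your support",
--      "core": "Engage your core muscles for stability"},
--     {"spine": "Lengthen your spine, don't compress lower back",
--      "shoulder": "Roll shoulders back and down",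
--      "breathing": "Breathe deeply, don't hold your breath"},
--     {"spine": "Lengthen your spine before twisting",
--      "shoulders": "Keep shoulders level and relaxed",
--      "breathing": "Twist gently with each exhale"},
--     {"hips": "Don't force the hip opening",
--      "alignment": "Keep your hips level",
--      "spine": "Keep your spine upright"},
--     {"focus": "Find a focal point to maintain balance",
--      "core": "Engage your core for stability",
--      "breathing": "Maintain steady, deep breathing"},
--     {"alignment": "Maintain proper spinal alignment",
--      "breathing": "Breathe deeply and steadily",
--      "comfort": "Only go as deep as is comfortable"},
-- ]
--
--
-- def generate_corrections(pose_name, angles):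
--     """Generate correction suggestions"""
--     pose_lower = pose_name.lower()
--     idx = min((cat for kw, cat in _KEYWORD_CATEGORY.items() if kw in pose_lower),
--               default=len(_CATEGORY_CORRECTIONS) - 1)
--     return dict(_CATEGORY_CORRECTIONS[idx])
-- ===== Notes on version B (the rewrite author's own statement) =====
-- stated objective: alternative
-- what changed: Replaces the ordered if/elif first-match chain by an aggregation: every keyword carries a numeric category index, B scans all keywords and takes the MINIMUM matching index (default 7) to select the corrections dict from an indexed table.
import Mathlib
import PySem

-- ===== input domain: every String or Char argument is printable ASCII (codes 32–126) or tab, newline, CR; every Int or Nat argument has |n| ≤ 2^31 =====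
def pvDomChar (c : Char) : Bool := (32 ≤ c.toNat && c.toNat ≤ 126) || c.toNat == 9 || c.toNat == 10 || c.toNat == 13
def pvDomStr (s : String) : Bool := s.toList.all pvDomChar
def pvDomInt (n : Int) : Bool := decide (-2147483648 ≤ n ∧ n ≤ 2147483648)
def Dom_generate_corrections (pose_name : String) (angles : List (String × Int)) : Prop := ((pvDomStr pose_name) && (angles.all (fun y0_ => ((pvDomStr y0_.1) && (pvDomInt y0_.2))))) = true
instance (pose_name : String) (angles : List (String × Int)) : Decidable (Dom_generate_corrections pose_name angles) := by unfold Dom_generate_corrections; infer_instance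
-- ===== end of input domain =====

-- B replaces A's ordered if/elif first-match chain by an aggregation: each keyword carries a
-- numeric category index, B takes the minimum matching index and selects from an indexed table
-- (objective: alternative).

-- ===== PORT A =====
-- literal transliteration of A's if/elif chain; dicts built by successive insertion
def generate_corrections (pose_name : String) (_angles : List (String × Int)) : List (String × String) :=
  let corrections : PySem.Dict String String := PySem.Dict.empty
  let pose_lower := PySem.Str.lower pose_name
  if (["warrior", "standing"].any (fun x => PySem.Str.isIn x pose_lower)) then
    let corrections := corrections.insert "stance" "Keep your feet grounded and weight evenly distributed"
    let corrections := corrections.insert "alignment" "Align your front knee over your ankle"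
    let corrections := corrections.insert "spine" "Keep your spine neutral and shoulders relaxed"
    corrections.items
  else if (["forward", "fold"].any (fun x => PySem.Str.isIn x pose_lower)) then
    let corrections := corrections.insert "spine" "Keep your back straight, hinge from the hips"
    let corrections := corrections.insert "hamstrings" "Don't force the stretch, bend your knees if needed"
    let corrections := corrections.insert "neck" "Keep your neck relaxed"
    corrections.items
  else if (["handstand", "headstand", "shoulder"].any (fun x => PySem.Str.isIn x pose_lower)) then
    let corrections := corrections.insert "alignment" "Keep your body in a straight line"
    let corrections := corrections.insert "weight" "Distribute weight evenly through your support"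
    let corrections := corrections.insert "core" "Engage your core muscles for stability"
    corrections.items
  else if (["backbend", "wheel", "bow", "cobra"].any (fun x => PySem.Str.isIn x pose_lower)) then
    let corrections := corrections.insert "spine" "Lengthen your spine, don't compress lower back"
    let corrections := corrections.insert "shoulder" "Roll shoulders back and down"
    let corrections := corrections.insert "breathing" "Breathe deeply, don't hold your breath"
    corrections.items
  else if (["twist", "revolved"].any (fun x => PySem.Str.isIn x pose_lower)) then
    let corrections := corrections.insert "spine" "Lengthen your spine before twisting"
    let corrections := corrections.insert "shoulders" "Keep shoulders level and relaxed"
    let corrections := corrections.insert "breathing" "Twist gently with each exhale"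
    corrections.items
  else if (["hip", "pigeon", "frog"].any (fun x => PySem.Str.isIn x pose_lower)) then
    let corrections := corrections.insert "hips" "Don't force the hip opening"
    let corrections := corrections.insert "alignment" "Keep your hips level"
    let corrections := corrections.insert "spine" "Keep your spine upright"
    corrections.items
  else if (["balance", "tree", "half moon"].any (fun x => PySem.Str.isIn x pose_lower)) then
    let corrections := corrections.insert "focus" "Find a focal point to maintain balance"
    let corrections := corrections.insert "core" "Engage your core for stability"
    let corrections := corrections.insert "breathing" "Maintain steady, deep breathing"
    corrections.items
  else
    let corrections := corrections.insert "alignment" "Maintain proper spinal alignment"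
    let corrections := corrections.insert "breathing" "Breathe deeply and steadily"
    let corrections := corrections.insert "comfort" "Only go as deep as is comfortable"
    corrections.items

-- ===== PORT B =====
-- the keyword → category-index map, flattened (insertion order of the Python dict)
def pvKeywordCategory : List (String × Nat) :=
  [("warrior", 0), ("standing", 0),
   ("forward", 1), ("fold", 1),
   ("handstand", 2), ("headstand", 2), ("shoulder", 2),
   ("backbend", 3), ("wheel", 3), ("bow", 3), ("cobra", 3),
   ("twist", 4), ("revolved", 4),
   ("hip", 5), ("pigeon", 5), ("frog", 5),
   ("balance", 6), ("tree", 6), ("half moon", 6)]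

-- indexed table of correction dicts; index 7 is the default
def pvCategoryCorrections : List (List (String × String)) :=
  [[("stance", "Keep your feet grounded and weight evenly distributed"),
    ("alignment", "Align your front knee over your ankle"),
    ("spine", "Keep your spine neutral and shoulders relaxed")],
   [("spine", "Keep your back straight, hinge from the hips"),
    ("hamstrings", "Don't force the stretch, bend your knees if needed"),
    ("neck", "Keep your neck relaxed")],
   [("alignment", "Keep your body in a straight line"),
    ("weight", "Distribute weight evenly through your support"),
    ("core", "Engage your core muscles for stability")],
   [("spine", "Lengthen your spine, don't compress lower back"),
    ("shoulder", "Roll shoulders back and down"),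
    ("breathing", "Breathe deeply, don't hold your breath")],
   [("spine", "Lengthen your spine before twisting"),
    ("shoulders", "Keep shoulders level and relaxed"),
    ("breathing", "Twist gently with each exhale")],
   [("hips", "Don't force the hip opening"),
    ("alignment", "Keep your hips level"),
    ("spine", "Keep your spine upright")],
   [("focus", "Find a focal point to maintain balance"),
    ("core", "Engage your core for stability"),
    ("breathing", "Maintain steady, deep breathing")],
   [("alignment", "Maintain proper spinal alignment"),
    ("breathing", "Breathe deeply and steadily"),
    ("comfort", "Only go as deep as is comfortable")]]

-- min over the matching categories with default 7, as a fold (Python's min(gen, default=...))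
def generate_corrections_alt (pose_name : String) (_angles : List (String × Int)) : List (String × String) :=
  let pose_lower := PySem.Str.lower pose_name
  let idx := pvKeywordCategory.foldl
    (fun acc kc => if PySem.Str.isIn kc.1 pose_lower then min acc kc.2 else acc)
    (pvCategoryCorrections.length - 1)
  pvCategoryCorrections.getD idx []

-- ===== PRECONDITION & SPEC =====
def Spec_generate_corrections (pose_name : String) (angles : List (String × Int)) (out : List (String × String)) : Prop := out = generate_corrections_alt pose_name angles
instance (pose_name : String) (angles : List (String × Int)) (out : List (String × String)) : Decidable (Spec_generate_corrections pose_name angles out) := by unfold Spec_generate_corrections; infer_instance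

-- ===== CLAIM (what is proved, stated in full; the proofs are below) =====
def Claim_equal_generate_corrections : Prop := ∀ (pose_name : String) (angles : List (String × Int)), Dom_generate_corrections pose_name angles → Spec_generate_corrections pose_name angles (generate_corrections pose_name angles)

-- ===== LEMMAS AND PROOFS =====
-- folding the min-step over a block of keywords that all carry the same category c
theorem pv_fold_group (pl : String) (c : Nat) (ks : List String)
    (rest : List (String × Nat)) (acc : Nat) :
    List.foldl (fun acc kc => if PySem.Str.isIn kc.1 pl then min acc kc.2 else acc) acc
      (ks.map (fun k => (k, c)) ++ rest)
    = List.foldl (fun acc kc => if PySem.Str.isIn kc.1 pl then min acc kc.2 else acc)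
        (if ks.any (fun k => PySem.Str.isIn k pl) then min acc c else acc) rest := by
  induction ks generalizing acc with
  | nil => simp
  | cons k ks ih =>
    rw [List.map_cons, List.cons_append, List.foldl_cons, ih, List.any_cons]
    congr 1
    by_cases h : PySem.Str.isIn k pl = true <;>
      by_cases h2 : (ks.any fun k => PySem.Str.isIn k pl) = true <;>
      simp only [h, h2, Bool.true_or, Bool.false_or, Bool.or_self, if_true, if_false,
        Bool.false_eq_true, min_assoc, min_self]

theorem generate_corrections_eq_alt (pose_name : String) (angles : List (String × Int)) :
    generate_corrections pose_name angles = generate_corrections_alt pose_name angles := by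
  simp only [generate_corrections, generate_corrections_alt]
  have hsplit : pvKeywordCategory =
      (["warrior", "standing"].map (fun k => (k, 0))) ++
      ((["forward", "fold"].map (fun k => (k, 1))) ++
      ((["handstand", "headstand", "shoulder"].map (fun k => (k, 2))) ++
      ((["backbend", "wheel", "bow", "cobra"].map (fun k => (k, 3))) ++
      ((["twist", "revolved"].map (fun k => (k, 4))) ++
      ((["hip", "pigeon", "frog"].map (fun k => (k, 5))) ++
      ((["balance", "tree", "half moon"].map (fun k => (k, 6))) ++ ([] : List (String × Nat)))))))) := rfl
  rw [hsplit, pv_fold_group, pv_fold_group, pv_fold_group, pv_fold_group, pv_fold_group,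
    pv_fold_group, pv_fold_group]
  generalize (["warrior", "standing"].any (fun k => PySem.Str.isIn k (PySem.Str.lower pose_name))) = g1
  generalize (["forward", "fold"].any (fun k => PySem.Str.isIn k (PySem.Str.lower pose_name))) = g2
  generalize (["handstand", "headstand", "shoulder"].any (fun k => PySem.Str.isIn k (PySem.Str.lower pose_name))) = g3
  generalize (["backbend", "wheel", "bow", "cobra"].any (fun k => PySem.Str.isIn k (PySem.Str.lower pose_name))) = g4
  generalize (["twist", "revolved"].any (fun k => PySem.Str.isIn k (PySem.Str.lower pose_name))) = g5
  generalize (["hip", "pigeon", "frog"].any (fun k => PySem.Str.isIn k (PySem.Str.lower pose_name))) = g6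
  generalize (["balance", "tree", "half moon"].any (fun k => PySem.Str.isIn k (PySem.Str.lower pose_name))) = g7
  cases g1 <;> cases g2 <;> cases g3 <;> cases g4 <;> cases g5 <;> cases g6 <;> cases g7 <;> rfl

-- ===== VERDICT (by name: the statement is the Claim_ definition above) =====
theorem generate_corrections_spec : Claim_equal_generate_corrections := by
  intro pose_name angles _
  exact generate_corrections_eq_alt pose_name angles
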